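-- pv_equiv track=rewrite | github.com/thehalleyyoung/diversity-decoding | implementation/src/metrics/structural.py | _key_roots
-- ===== SOURCE A (Python) =====
-- from typing import (
--     Any,
--     Callable,
--     Dict,
--     List,
--     Optional,
--     Sequence,
--     Set,
--     Tuple,
--     Union,
-- )
--
-- def _key_roots(lr: List[int]) -> List[int]:
--     """Key roots for Zhang-Shasha: nodes whose leftmost-leaf
--     index is not shared by any node to the right."""
--     visited: Set[int] = set()
--     kr: List[int] = []
--     for i in range(len(lr) - 1, -1, -1):
--         if lr[i] not in visited:
--             kr.append(i)
--             visited.add(lr[i])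
--     kr.sort()
--     return kr
-- ===== SOURCE B (Python) =====
-- def _key_roots(lr):
--     """Key roots: the last-seen index of each distinct leftmost-leaf value,
--     collected in one forward pass into a dict, then sorted."""
--     last = {}
--     for i, v in enumerate(lr):
--         last[v] = i
--     return sorted(last.values())
-- ===== Notes on version B (the rewrite author's own statement) =====
-- stated objective: simpler
-- what changed: Replaces the reverse index scan with a visited-set and conditional append by a single forward pass that overwrites a value->last-index dict unconditionally, then sorts the dict's values.
import Mathlib
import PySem

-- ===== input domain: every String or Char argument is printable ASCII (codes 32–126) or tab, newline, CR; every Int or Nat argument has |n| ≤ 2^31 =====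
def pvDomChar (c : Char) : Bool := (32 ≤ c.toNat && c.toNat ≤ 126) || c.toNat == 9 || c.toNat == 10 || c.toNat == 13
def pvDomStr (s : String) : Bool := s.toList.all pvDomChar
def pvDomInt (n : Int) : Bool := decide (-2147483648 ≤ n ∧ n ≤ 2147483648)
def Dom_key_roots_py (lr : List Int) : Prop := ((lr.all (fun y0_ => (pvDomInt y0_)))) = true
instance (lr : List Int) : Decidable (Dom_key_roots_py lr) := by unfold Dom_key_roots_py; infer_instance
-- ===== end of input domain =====

-- B replaces A's reverse scan + visited set + conditional append by a forward
-- value→last-index dict built with unconditional overwrites; objective: simpler.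

-- ===== PORT A =====
-- reverse scan: for i in range(len(lr)-1, -1, -1): if lr[i] not in visited: kr.append(i); visited.add(lr[i]); kr.sort()
def key_roots_py (lr : List Int) : List Int :=
  let st :=
    (PySem.List.pyRange ((lr.length : Int) - 1) (-1) (-1)).foldl
      (fun (st : PySem.Set Int × List Int) i =>
        if !(PySem.Set.contains st.1 (PySem.List.pyGetD lr i 0)) then
          (PySem.Set.add st.1 (PySem.List.pyGetD lr i 0), st.2 ++ [i])
        else st)
      (PySem.Set.empty, [])
  PySem.List.sorted st.2 (fun x => x) false

-- ===== PORT B =====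
-- forward pass: for i, v in enumerate(lr): last[v] = i; return sorted(last.values())
def key_roots_py_alt (lr : List Int) : List Int :=
  let last :=
    (PySem.List.enumerate lr 0).foldl
      (fun (d : PySem.Dict Int Int) p => d.insert p.2 p.1)
      PySem.Dict.empty
  PySem.List.sorted last.values (fun x => x) false

-- ===== PRECONDITION & SPEC =====
def Spec_key_roots_py (lr : List Int) (out : List Int) : Prop := out = key_roots_py_alt lr
instance (lr : List Int) (out : List Int) : Decidable (Spec_key_roots_py lr out) := by unfold Spec_key_roots_py; infer_instance

-- ===== CLAIM (what is proved, stated in full; the proofs are below) =====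
def Claim_equal_key_roots_py : Prop := ∀ (lr : List Int), Dom_key_roots_py lr → Spec_key_roots_py lr (key_roots_py lr)

-- ===== LEMMAS AND PROOFS =====

-- last-occurrence index of v in a list (proof-side spec, used by both characterizations)
def lastIdxN (v : Int) : List Int → Option Nat
  | [] => none
  | x :: xs =>
    match lastIdxN v xs with
    | some k => some (k + 1)
    | none => if x = v then some 0 else none

lemma mem_of_lastIdxN_some {v : Int} {lr : List Int} {k : Nat}
    (h : lastIdxN v lr = some k) : v ∈ lr := by
  induction lr generalizing k with
  | nil => simp [lastIdxN] at h
  | cons x xs ih =>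
    rw [lastIdxN] at h
    cases h' : lastIdxN v xs with
    | some m => exact List.mem_cons_of_mem x (ih h')
    | none =>
      rw [h'] at h
      by_cases hx : x = v
      · simp [hx]
      · simp [hx] at h

lemma lastIdxN_eq_none_iff (v : Int) (lr : List Int) :
    lastIdxN v lr = none ↔ v ∉ lr := by
  induction lr with
  | nil => simp [lastIdxN]
  | cons x xs ih =>
    rw [lastIdxN]
    cases h : lastIdxN v xs with
    | some m =>
      simp only [reduceCtorEq, false_iff, not_not]
      exact List.mem_cons_of_mem x (mem_of_lastIdxN_some h)
    | none =>
      by_cases hx : x = v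
      · simp [hx]
      · simp [hx, ← ih, h, Ne.symm hx]

lemma getD_mem_of_lt {xs : List Int} {j : Nat} (h : j < xs.length) : xs.getD j 0 ∈ xs := by
  rw [List.getD_eq_getElem xs 0 h]; exact List.getElem_mem h

lemma lastIdxN_eq_some_iff (v : Int) (lr : List Int) (k : Nat) :
    lastIdxN v lr = some k ↔ k < lr.length ∧ lr.getD k 0 = v ∧ v ∉ lr.drop (k + 1) := by
  induction lr generalizing k with
  | nil => simp [lastIdxN]
  | cons x xs ih =>
    rw [lastIdxN]
    cases h : lastIdxN v xs with
    | some m =>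
      cases k with
      | zero =>
        have hv : v ∈ xs := mem_of_lastIdxN_some h
        simp [hv]
      | succ j =>
        have := ih j
        rw [h] at this
        simp only [List.length_cons, List.getD_cons_succ, List.drop_succ_cons]
        constructor
        · intro hk
          have hjm : j = m := by injection hk with h'; omega
          subst hjm
          obtain ⟨h1, h2, h3⟩ := this.mp rfl
          exact ⟨by omega, h2, h3⟩
        · rintro ⟨h1, h2, h3⟩
          have hmj := this.mpr ⟨by omega, h2, h3⟩
          injection hmj with h'
          rw [h']
    | none =>
      have hv : v ∉ xs := (lastIdxN_eq_none_iff v xs).mp h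
      by_cases hx : x = v
      · subst hx
        cases k with
        | zero => simp [hv]
        | succ j =>
          simp only [List.length_cons, List.getD_cons_succ, List.drop_succ_cons]
          constructor
          · intro hk; simp at hk
          · rintro ⟨hj, hgd, -⟩
            exact absurd (hgd ▸ getD_mem_of_lt (by omega)) hv
      · cases k with
        | zero => simp [hx]
        | succ j =>
          constructor
          · intro hk; simp [hx] at hk
          · rintro ⟨hj, hgd, -⟩
            exfalso
            rw [List.getD_cons_succ] at hgd
            rw [List.length_cons] at hj
            exact absurd (hgd ▸ getD_mem_of_lt (by omega)) hv

-- B: the dict after the forward fold looks up the last index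
lemma B_get (lr : List Int) : ∀ (s : Int) (d0 : PySem.Dict Int Int) (v : Int),
    ((PySem.List.enumerate lr s).foldl
        (fun (d : PySem.Dict Int Int) p => d.insert p.2 p.1) d0).get? v =
      match lastIdxN v lr with
      | some k => some (s + k)
      | none => d0.get? v := by
  induction lr with
  | nil => intro s d0 v; simp [PySem.List.enumerate_nil, lastIdxN]
  | cons x xs ih =>
    intro s d0 v
    rw [PySem.List.enumerate_cons, List.foldl_cons, ih (s + 1), lastIdxN]
    cases h : lastIdxN v xs with
    | some k =>
      simp only []
      congr 1
      push_cast
      ring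
    | none =>
      by_cases hx : x = v
      · subst hx
        simp [PySem.Dict.get?_insert_self]
      · simp [hx, PySem.Dict.get?_insert_of_ne _ _ (Ne.symm hx)]

-- A: the reverse fold collects exactly the last-occurrence indices, descending
lemma A_fold (lr : List Int) : ∀ (k : Nat), k ≤ lr.length →
    ∀ (vis : PySem.Set Int) (acc : List Int),
    (∀ v, v ∈ vis ↔ v ∈ lr.drop k) →
    ((PySem.List.pyRange ((k : Int) - 1) (-1) (-1)).foldl
        (fun (st : PySem.Set Int × List Int) i =>
          if !(PySem.Set.contains st.1 (PySem.List.pyGetD lr i 0)) then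
            (PySem.Set.add st.1 (PySem.List.pyGetD lr i 0), st.2 ++ [i])
          else st)
        (vis, acc)).2
      = acc ++ ((List.range k).reverse.filter
          (fun j => decide (lr.getD j 0 ∉ lr.drop (j + 1)))).map (fun j => Int.ofNat j) := by
  intro k
  induction k with
  | zero =>
    intro _ vis acc _
    rw [PySem.List.pyRange_neg_one_eq_nil (by norm_num)]
    simp
  | succ k ih =>
    intro hk vis acc hvis
    have hkl : k < lr.length := by omega
    have hrange : PySem.List.pyRange (((k + 1 : Nat) : Int) - 1) (-1) (-1)
        = ((k : Nat) : Int) :: PySem.List.pyRange (((k : Nat) : Int) - 1) (-1) (-1) := by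
      have h1 : (((k + 1 : Nat) : Int) - 1) = ((k : Nat) : Int) := by push_cast; ring
      rw [h1, PySem.List.pyRange_neg_one_cons (show (-1 : Int) < (k : Nat) by omega)]
    rw [hrange, List.foldl_cons]
    have hget : PySem.List.pyGetD lr ((k : Nat) : Int) 0 = lr.getD k 0 :=
      PySem.List.pyGetD_natCast lr k 0
    have hdropk : lr.drop k = lr.getD k 0 :: lr.drop (k + 1) := by
      rw [List.getD_eq_getElem lr 0 hkl]
      exact List.drop_eq_getElem_cons hkl
    have hfilter : (List.range (k + 1)).reverse.filter
          (fun j => decide (lr.getD j 0 ∉ lr.drop (j + 1)))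
        = (if lr.getD k 0 ∈ lr.drop (k + 1) then [] else [k])
          ++ (List.range k).reverse.filter (fun j => decide (lr.getD j 0 ∉ lr.drop (j + 1))) := by
      rw [List.range_succ, List.reverse_append, List.reverse_singleton,
        List.singleton_append, List.filter_cons]
      by_cases hmem : lr.getD k 0 ∈ lr.drop (k + 1)
      · rw [if_pos hmem]
        have hd : decide (lr.getD k 0 ∉ lr.drop (k + 1)) = false :=
          decide_eq_false (not_not_intro hmem)
        rw [hd]
        simp
      · rw [if_neg hmem]
        have hd : decide (lr.getD k 0 ∉ lr.drop (k + 1)) = true := decide_eq_true hmem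
        rw [hd]
        simp
    by_cases hmem : lr.getD k 0 ∈ lr.drop (k + 1)
    · have hc : PySem.Set.contains vis (PySem.List.pyGetD lr ((k : Nat) : Int) 0) = true := by
        rw [hget, PySem.Set.contains_iff, hvis]
        exact hmem
      have hstep : (if !(PySem.Set.contains vis (PySem.List.pyGetD lr ((k : Nat) : Int) 0)) then
            (PySem.Set.add vis (PySem.List.pyGetD lr ((k : Nat) : Int) 0),
              acc ++ [((k : Nat) : Int)])
          else (vis, acc)) = (vis, acc) := by rw [hc]; rfl
      have hinv : ∀ v, v ∈ vis ↔ v ∈ lr.drop k := by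
        intro v
        rw [hvis, hdropk, List.mem_cons]
        constructor
        · intro hv; exact Or.inr hv
        · rintro (h | h)
          · exact h ▸ hmem
          · exact h
      rw [hstep, ih (by omega) vis acc hinv, hfilter, if_pos hmem]
      simp
    · have hc : PySem.Set.contains vis (PySem.List.pyGetD lr ((k : Nat) : Int) 0) = false := by
        rw [hget]
        cases hb : PySem.Set.contains vis (lr.getD k 0)
        · rfl
        · exfalso
          have hin := (PySem.Set.contains_iff vis (lr.getD k 0)).mp hb
          rw [hvis] at hin
          exact hmem hin
      have hstep : (if !(PySem.Set.contains vis (PySem.List.pyGetD lr ((k : Nat) : Int) 0)) then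
            (PySem.Set.add vis (PySem.List.pyGetD lr ((k : Nat) : Int) 0),
              acc ++ [((k : Nat) : Int)])
          else (vis, acc))
          = (PySem.Set.add vis (lr.getD k 0), acc ++ [((k : Nat) : Int)]) := by
        rw [hc, hget]; rfl
      have hinv : ∀ v, v ∈ PySem.Set.add vis (lr.getD k 0) ↔ v ∈ lr.drop k := by
        intro v
        rw [PySem.Set.mem_add, hvis, hdropk, List.mem_cons]
        tauto
      rw [hstep, ih (by omega) _ _ hinv, hfilter, if_neg hmem]
      simp

lemma B_keys_nodup (lr : List Int) :
    ((PySem.List.enumerate lr 0).foldl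
        (fun (d : PySem.Dict Int Int) p => d.insert p.2 p.1) PySem.Dict.empty).keys.Nodup := by
  rw [PySem.Dict.keys_foldl_insert_key]
  simp only [PySem.Dict.keys_empty, PySem.Set.update_nil_left, PySem.List.map_snd_enumerate]
  exact PySem.Set.nodup_ofList lr

lemma B_get_entry (lr : List Int) {p : Int × Int}
    (hp : p ∈ ((PySem.List.enumerate lr 0).foldl
        (fun (d : PySem.Dict Int Int) q => d.insert q.2 q.1) PySem.Dict.empty).items) :
    ∃ k : Nat, lastIdxN p.1 lr = some k ∧ p.2 = (k : Int) := by
  have hg : ((PySem.List.enumerate lr 0).foldl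
      (fun (d : PySem.Dict Int Int) q => d.insert q.2 q.1)
        PySem.Dict.empty).get? p.1 = some p.2 :=
    PySem.Dict.get?_of_mem_items _ hp (B_keys_nodup lr)
  rw [B_get lr 0] at hg
  cases h : lastIdxN p.1 lr with
  | none => rw [h] at hg; simp [PySem.Dict.get?_empty] at hg
  | some k =>
    rw [h] at hg
    injection hg with hg'
    exact ⟨k, rfl, by omega⟩

lemma B_values_mem (lr : List Int) (i : Int) :
    i ∈ ((PySem.List.enumerate lr 0).foldl
        (fun (d : PySem.Dict Int Int) p => d.insert p.2 p.1) PySem.Dict.empty).values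
      ↔ ∃ k : Nat, k < lr.length ∧ lr.getD k 0 ∉ lr.drop (k + 1) ∧ i = Int.ofNat k := by
  constructor
  · intro hi
    simp only [PySem.Dict.values] at hi
    obtain ⟨p, hp, hpi⟩ := List.mem_map.mp hi
    obtain ⟨k, hsome, hk⟩ := B_get_entry lr hp
    obtain ⟨hkl, hgd, hnm⟩ := (lastIdxN_eq_some_iff p.1 lr k).mp hsome
    exact ⟨k, hkl, hgd ▸ hnm, by rw [← hpi, hk, Int.ofNat_eq_natCast]⟩
  · rintro ⟨k, hk, hnm, rfl⟩
    have hsome : lastIdxN (lr.getD k 0) lr = some k :=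
      (lastIdxN_eq_some_iff _ _ _).mpr ⟨hk, rfl, hnm⟩
    have hq : ((PySem.List.enumerate lr 0).foldl
        (fun (d : PySem.Dict Int Int) p => d.insert p.2 p.1)
          PySem.Dict.empty).get? (lr.getD k 0) = some ((0 : Int) + k) := by
      rw [B_get lr 0 _ _, hsome]
    have hmi := PySem.Dict.mem_items_of_get?_eq_some _ hq
    simp only [PySem.Dict.values]
    exact List.mem_map.mpr ⟨(lr.getD k 0, (0 : Int) + k), hmi, by
      simp [Int.ofNat_eq_natCast]⟩

lemma B_values_nodup (lr : List Int) :
    ((PySem.List.enumerate lr 0).foldl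
        (fun (d : PySem.Dict Int Int) p => d.insert p.2 p.1) PySem.Dict.empty).values.Nodup := by
  have hknd := B_keys_nodup lr
  have hitems : ((PySem.List.enumerate lr 0).foldl
      (fun (d : PySem.Dict Int Int) p => d.insert p.2 p.1) PySem.Dict.empty).items.Nodup :=
    List.Nodup.of_map Prod.fst (by simpa only [PySem.Dict.keys] using hknd)
  simp only [PySem.Dict.values]
  refine List.Nodup.map_on ?_ hitems
  intro p hp q hq hpq
  obtain ⟨kp, hsp, hkp⟩ := B_get_entry lr hp
  obtain ⟨kq, hsq, hkq⟩ := B_get_entry lr hq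
  have hkk : kp = kq := by
    rw [hpq] at hkp
    rw [hkp] at hkq
    exact_mod_cast hkq
  obtain ⟨-, hgp, -⟩ := (lastIdxN_eq_some_iff p.1 lr kp).mp hsp
  obtain ⟨-, hgq, -⟩ := (lastIdxN_eq_some_iff q.1 lr kq).mp hsq
  have h1 : p.1 = q.1 := by rw [← hgp, ← hgq, hkk]
  exact Prod.ext h1 hpq

theorem key_roots_py_spec : Claim_equal_key_roots_py := by
  intro lr _
  unfold Spec_key_roots_py
  simp only [key_roots_py, key_roots_py_alt]
  rw [A_fold lr lr.length le_rfl PySem.Set.empty []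
    (by intro v; simp [PySem.Set.empty])]
  apply PySem.List.sorted_eq_sorted_of_perm _ _ (fun x => x) Function.injective_id
  have hGnodup : (((List.range lr.length).reverse.filter
      (fun j => decide (lr.getD j 0 ∉ lr.drop (j + 1)))).map (fun j => Int.ofNat j)).Nodup := by
    exact ((List.nodup_reverse.mpr (List.nodup_range)).filter _).map
      (fun a b h => by simpa [Int.ofNat_eq_natCast] using congrArg Int.toNat h)
  have hVnodup := B_values_nodup lr
  rw [List.nil_append]
  apply (List.perm_ext_iff_of_nodup hGnodup hVnodup).mpr
  intro i
  rw [B_values_mem]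
  simp only [List.mem_map, List.mem_filter, List.mem_reverse, List.mem_range,
    decide_eq_true_eq]
  constructor
  · rintro ⟨j, ⟨hj, hnm⟩, rfl⟩
    exact ⟨j, hj, hnm, rfl⟩
  · rintro ⟨k, hk, hnm, rfl⟩
    exact ⟨k, ⟨hk, hnm⟩, rfl⟩
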